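-- pv_equiv track=rewrite | github.com/shamsul5435/project280622 | word_V2.py | get_letter_position
-- ===== SOURCE A (Python) =====
-- def get_letter_position(guess, word, spaces):
--     index = -2
--     while index != -1:
--         if guess in word:
--             index = word.find(guess) #Finds index with the first occurance of the letter
--             removed_character ='*'
--             word = word[:index] + removed_character + word[index+1:] #If 'i' is inputted, Dish -> D*sh
--             spaces[index] = guess #Reveals the the correct guess
--         else:
--             index = -1
--
--     return (word, spaces) #returns the new word and spaces
-- ===== SOURCE B (Python) =====
-- def get_letter_position(guess, word, spaces):
--     # Single forward scan: find every occurrence of guess in the ORIGINAL word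
--     # with a non-resetting start pointer, star them and reveal them in one pass (no per-round rebuild).
--     # (Like A, this mutates `spaces` in place.)
--     if guess and guess in word:
--         chars = list(word)
--         i = word.find(guess)
--         while i != -1:
--             chars[i] = '*'
--             spaces[i] = guess
--             i = word.find(guess, i + 1)
--         word = ''.join(chars)
--     return (word, spaces)
-- ===== Notes on version B (the rewrite author's own statement) =====
-- stated objective: alternative
-- what changed: A repeatedly re-finds the guess from index 0 in a word it rebuilds (starring one occurrence per round); B does one forward scan over the original word with a non-resetting find pointer, starring and revealing every occurrence in a single pass.
import Mathlib
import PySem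

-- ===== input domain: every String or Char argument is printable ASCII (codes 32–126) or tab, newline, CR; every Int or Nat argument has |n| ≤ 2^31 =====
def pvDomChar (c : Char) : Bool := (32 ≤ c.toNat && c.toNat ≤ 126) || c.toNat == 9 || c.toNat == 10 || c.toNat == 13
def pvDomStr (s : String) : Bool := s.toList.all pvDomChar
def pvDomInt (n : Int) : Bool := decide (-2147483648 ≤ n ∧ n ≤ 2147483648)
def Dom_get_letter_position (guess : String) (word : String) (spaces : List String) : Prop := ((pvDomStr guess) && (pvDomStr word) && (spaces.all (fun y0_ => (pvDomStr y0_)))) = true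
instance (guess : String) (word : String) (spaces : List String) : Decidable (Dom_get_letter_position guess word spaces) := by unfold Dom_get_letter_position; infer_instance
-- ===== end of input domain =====

-- B replaces A's restart-from-zero find loop (which rebuilds the word string each round) by a
-- single forward scan over the original word with a non-resetting find pointer (objective:
-- alternative). Both Pythons mutate `spaces` in place; the equivalence proved here is about the
-- RETURN value.

-- ===== PORT A =====
-- A's `while index != -1` loop: the sentinel bookkeeping is exactly "loop while guess in word".
-- Strings are carried as List Char (PySem.Chars primitives); fuel = |word| + 1 bounds the
-- iterations (inside Pre_ each pass stars one more character of word).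
def pvLoopA (g : List Char) (gs : String) : Nat → List Char → List String → List Char × List String
  | 0, word, spaces => (word, spaces)
  | fuel+1, word, spaces =>
    if PySem.Chars.isIn g word = true then
      -- index = word.find(guess); word = word[:index] + '*' + word[index+1:]; spaces[index] = guess
      let index : Int := PySem.Chars.find word g
      pvLoopA g gs fuel
        (PySem.Chars.slice word none (some index) ++ '*' :: PySem.Chars.slice word (some (index + 1)) none)
        (PySem.List.pySetD spaces index gs)    -- exact under Pre_ (index in range of spaces)
    else (word, spaces)

def get_letter_position (guess : String) (word : String) (spaces : List String) : String × List String :=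
  let r := pvLoopA guess.toList guess (word.toList.length + 1) word.toList spaces
  (String.ofList r.1, r.2)

-- ===== PORT B =====
-- B's scan: i = word.find(guess); while i != -1: chars[i]='*'; spaces[i]=guess; i = word.find(guess, i+1).
-- fuel = |word| + 1 bounds the iterations (i strictly increases).
def pvLoopB (g : List Char) (gs : String) (w0 : List Char) : Nat → Int → List Char → List String → List Char × List String
  | 0, _, chars, spaces => (chars, spaces)
  | fuel+1, i, chars, spaces =>
    if i = -1 then (chars, spaces)
    else pvLoopB g gs w0 fuel (PySem.Chars.findFrom w0 g (i + 1) none)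
          (PySem.List.pySetD chars i '*') (PySem.List.pySetD spaces i gs)    -- exact under Pre_

def get_letter_position_alt (guess : String) (word : String) (spaces : List String) : String × List String :=
  if guess ≠ "" ∧ PySem.Str.isIn guess word = true then
    let w0 := word.toList
    let r := pvLoopB guess.toList guess w0 (w0.length + 1) (PySem.Chars.find w0 guess.toList) w0 spaces
    (String.ofList r.1, r.2)    -- ''.join(chars)
  else (word, spaces)

-- ===== PRECONDITION & SPEC =====
-- Pre_ excludes exactly the inputs where A's Python does not return normally or its value is an
-- accident of its '*' sentinel: the empty guess (A loops forever), a guess containing '*' that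
-- occurs in word (the sentinel collides with the pattern: A may loop forever or star extra
-- positions found by re-scanning from 0), and an occurrence of guess starting at an index
-- ≥ len(spaces), where `spaces[index] = guess` raises IndexError (in A and in B alike).
def Pre_get_letter_position (guess : String) (word : String) (spaces : List String) : Prop :=
  guess ≠ "" ∧ (PySem.Str.isIn guess word = false ∨
    ('*' ∉ guess.toList ∧
      ∀ j, j < word.toList.length → guess.toList <+: word.toList.drop j → j < spaces.length))
instance (guess : String) (word : String) (spaces : List String) : Decidable (Pre_get_letter_position guess word spaces) := by unfold Pre_get_letter_position; infer_instance

def pvWitness_get_letter_position : String × String × List String := ("a", "ab", ["_", "_"])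

def Spec_get_letter_position (guess : String) (word : String) (spaces : List String) (out : String × List String) : Prop := out = get_letter_position_alt guess word spaces
instance (guess : String) (word : String) (spaces : List String) (out : String × List String) : Decidable (Spec_get_letter_position guess word spaces out) := by unfold Spec_get_letter_position; infer_instance

-- ===== CLAIM (what is proved, stated in full; the proofs are below) =====
def Claim_equal_get_letter_position : Prop := ∀ (guess : String) (word : String) (spaces : List String), Dom_get_letter_position guess word spaces → Pre_get_letter_position guess word spaces → Spec_get_letter_position guess word spaces (get_letter_position guess word spaces)

-- ===== LEMMAS AND PROOFS =====

-- the occurrence starts of g in w (ascending)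
def pvOcc (g w : List Char) : List Nat :=
  (List.range w.length).filter (fun j => decide (g <+: w.drop j))

-- the common "reveal one occurrence" step both loops reduce to
def pvStep (gs : String) (st : List Char × List String) (j : Nat) : List Char × List String :=
  (st.1.set j '*', PySem.List.pySetD st.2 (j : Int) gs)

theorem pv_prefix_drop_iff (g w : List Char) (j : Nat) :
    g <+: w.drop j ↔ ∀ k (_ : k < g.length), w[j + k]? = some g[k] := by
  constructor
  · intro h k hk
    have hlen : g.length ≤ (w.drop j).length := h.length_le
    rw [← List.getElem?_drop]
    have hge := h.getElem (i := k) (by omega)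
    rw [List.getElem?_eq_getElem (by omega), hge]
    rfl
  · intro h
    rcases Nat.eq_zero_or_pos g.length with h0 | hpos
    · simp [List.length_eq_zero_iff.mp h0]
    · have hlast := h (g.length - 1) (by omega)
      have hlt : j + (g.length - 1) < w.length := by
        by_contra hge
        rw [List.getElem?_eq_none (by omega)] at hlast
        simp at hlast
      rw [List.prefix_iff_eq_take]
      apply List.ext_getElem?
      intro k
      by_cases hk : k < g.length
      · rw [List.getElem?_take_of_lt hk, List.getElem?_drop, h k hk,
          List.getElem?_eq_getElem hk]
      · rw [List.getElem?_eq_none (by omega), List.getElem?_eq_none (by simp; omega)]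

theorem pv_lt_length_of_prefix_drop {g w : List Char} {j : Nat} (hg : g ≠ [])
    (h : g <+: w.drop j) : j < w.length := by
  by_contra hge
  rw [List.drop_eq_nil_iff.mpr (by omega)] at h
  exact hg (List.prefix_nil.mp h)

theorem pv_mem_occ {g w : List Char} {j : Nat} (hg : g ≠ []) :
    j ∈ pvOcc g w ↔ g <+: w.drop j := by
  simp only [pvOcc, List.mem_filter, List.mem_range, decide_eq_true_eq]
  exact ⟨fun h => h.2, fun h => ⟨pv_lt_length_of_prefix_drop hg h, h⟩⟩

theorem pv_occ_pairwise (g w : List Char) : (pvOcc g w).Pairwise (· < ·) :=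
  List.Pairwise.sublist List.filter_sublist List.pairwise_lt_range

theorem pv_occ_nil {g w : List Char} (hg : g ≠ []) (h : ¬ g <:+: w) : pvOcc g w = [] := by
  rcases hd : pvOcc g w with _ | ⟨a, t⟩
  · rfl
  · exfalso
    have ha : a ∈ pvOcc g w := by rw [hd]; exact List.mem_cons_self
    have hp : g <+: w.drop a := (pv_mem_occ hg).mp ha
    exact h (hp.isInfix.trans (List.drop_suffix a w).isInfix)

-- the step lemma: starring the leftmost occurrence removes exactly that occurrence
theorem pv_set_prefix_iff {g w : List Char} {n : Nat} (hg : g ≠ []) (hst : '*' ∉ g)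
    (hpre : g <+: w.drop n) (hmin : ∀ i < n, ¬ g <+: w.drop i) (j : Nat) :
    g <+: (w.set n '*').drop j ↔ (g <+: w.drop j ∧ n < j) := by
  have hnlen : n < w.length := pv_lt_length_of_prefix_drop hg hpre
  constructor
  · intro h
    by_cases hnj : n < j
    · rw [List.drop_set_of_lt hnj] at h
      exact ⟨h, hnj⟩
    · exfalso
      have hall := (pv_prefix_drop_iff g (w.set n '*') j).mp h
      by_cases hcov : n < j + g.length
      · -- the window covers position n, which now holds '*'
        have hk : n - j < g.length := by omega
        have := hall (n - j) hk
        rw [show j + (n - j) = n by omega, List.getElem?_set, if_pos rfl,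
          if_pos (by simpa using hnlen)] at this
        have : g[n - j] = '*' := by
          have := this.symm
          simpa using this
        exact hst (this ▸ List.getElem_mem hk)
      · -- the window lies strictly left of n: contradicts minimality of n
        have hjlt : j < n := by
          have : 0 < g.length := List.length_pos_iff.mpr hg
          omega
        apply hmin j hjlt
        rw [pv_prefix_drop_iff]
        intro k hk
        have := hall k hk
        rwa [List.getElem?_set, if_neg (by omega)] at this
  · rintro ⟨hp, hnj⟩
    rwa [List.drop_set_of_lt hnj]

theorem pv_sorted_head_filter {l : List Nat} (hl : l.Pairwise (· < ·)) {n : Nat}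
    (hmem : n ∈ l) (hmin : ∀ j ∈ l, n ≤ j) :
    l = n :: l.filter (fun j => decide (n < j)) := by
  rcases l with _ | ⟨a, t⟩
  · cases hmem
  · have han : a = n := by
      rcases List.mem_cons.mp hmem with h | h
      · omega
      · have h1 := hmin a List.mem_cons_self
        have h2 := (List.pairwise_cons.mp hl).1 n h
        omega
    subst han
    have ht : ∀ x ∈ t, a < x := (List.pairwise_cons.mp hl).1
    simp only [List.filter_cons, decide_eq_true_eq]
    rw [if_neg (by omega)]
    congr 1
    exact (List.filter_eq_self.mpr (fun x hx => by simpa using ht x hx)).symm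

theorem pv_sorted_filter_ge {l : List Nat} (hl : l.Pairwise (· < ·)) {k n : Nat}
    (hkn : k ≤ n) (hmem : n ∈ l) (hmin : ∀ j ∈ l, k ≤ j → n ≤ j) :
    l.filter (fun j => decide (k ≤ j)) = n :: l.filter (fun j => decide (n + 1 ≤ j)) := by
  induction l with
  | nil => cases hmem
  | cons a t ih =>
    have ht : ∀ x ∈ t, a < x := (List.pairwise_cons.mp hl).1
    by_cases han : a = n
    · subst han
      simp only [List.filter_cons, decide_eq_true_eq]
      rw [if_pos hkn, if_neg (by omega)]
      congr 1
      have h1 : t.filter (fun j => decide (k ≤ j)) = t := by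
        rw [List.filter_eq_self]; intro x hx; have := ht x hx; simp; omega
      have h2 : t.filter (fun j => decide (a + 1 ≤ j)) = t := by
        rw [List.filter_eq_self]; intro x hx; have := ht x hx; simp; omega
      rw [h1, h2]
    · have hnt : n ∈ t := by
        rcases List.mem_cons.mp hmem with h | h
        · exact absurd h.symm han
        · exact h
      have hak : ¬ k ≤ a := by
        intro hka
        have h1 := hmin a List.mem_cons_self hka
        have h2 := ht n hnt
        omega
      have hlt : a < n := ht n hnt
      simp only [List.filter_cons, decide_eq_true_eq]
      rw [if_neg hak, if_neg (by omega)]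
      exact ih (List.pairwise_cons.mp hl).2 hnt (fun j hj => hmin j (List.mem_cons_of_mem a hj))

theorem pv_occ_set {g w : List Char} {n : Nat} (hg : g ≠ []) (hst : '*' ∉ g)
    (hpre : g <+: w.drop n) (hmin : ∀ i < n, ¬ g <+: w.drop i) :
    pvOcc g w = n :: pvOcc g (w.set n '*') := by
  have h1 : pvOcc g (w.set n '*') = (pvOcc g w).filter (fun j => decide (n < j)) := by
    unfold pvOcc
    rw [List.length_set, List.filter_filter]
    apply List.filter_congr
    intro j _
    simp [pv_set_prefix_iff hg hst hpre hmin j, Bool.and_comm]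
  rw [h1]
  exact pv_sorted_head_filter (pv_occ_pairwise g w)
    ((pv_mem_occ hg).mpr hpre)
    (fun j hj => by
      by_contra hjn
      exact hmin j (by omega) ((pv_mem_occ hg).mp hj))

theorem pv_loopA_eq (g : List Char) (gs : String) (hg : g ≠ []) (hst : '*' ∉ g) :
    ∀ (fuel : Nat) (w : List Char) (sp : List String), (pvOcc g w).length ≤ fuel →
      pvLoopA g gs fuel w sp = (pvOcc g w).foldl (pvStep gs) (w, sp) := by
  intro fuel
  induction fuel with
  | zero =>
    intro w sp hlen
    rw [List.length_eq_zero_iff.mp (Nat.le_zero.mp hlen)]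
    rfl
  | succ fuel ih =>
    intro w sp hlen
    by_cases hin : PySem.Chars.isIn g w = true
    · have hinf : g <:+: w := (PySem.Chars.isIn_iff_infix _ _).mp hin
      have hnn : 0 ≤ PySem.Chars.find w g := (PySem.Chars.find_nonneg_iff _ _).mpr hinf
      obtain ⟨hpre, hmin⟩ := PySem.Chars.find_spec (s := w) (sub := g) hnn
      set n : Nat := (PySem.Chars.find w g).toNat with hn
      have hidx : PySem.Chars.find w g = (n : Int) := (Int.toNat_of_nonneg hnn).symm
      have hnlen : n < w.length := pv_lt_length_of_prefix_drop hg hpre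
      have hslice : PySem.Chars.slice w none (some (PySem.Chars.find w g)) ++ '*' ::
          PySem.Chars.slice w (some (PySem.Chars.find w g + 1)) none = w.set n '*' := by
        rw [hidx, show ((n : Int) + 1) = ((n + 1 : Nat) : Int) by push_cast; ring]
        simp only [PySem.Chars.slice_eq_listSlice, PySem.List.slice_to_natCast,
          PySem.List.slice_from_natCast]
        exact (List.set_eq_take_cons_drop '*' hnlen).symm
      have hocc : pvOcc g w = n :: pvOcc g (w.set n '*') := pv_occ_set hg hst hpre hmin
      have hlen' : (pvOcc g (w.set n '*')).length ≤ fuel := by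
        have hl2 := congrArg List.length hocc
        rw [List.length_cons] at hl2
        omega
      simp only [pvLoopA, hin, if_pos]
      rw [hslice, hidx, ih (w.set n '*') (PySem.List.pySetD sp (n : Int) gs) hlen', hocc]
      rfl
    · have hocc : pvOcc g w = [] :=
        pv_occ_nil hg (by
          intro hinf
          exact hin ((PySem.Chars.isIn_iff_infix _ _).mpr hinf))
      simp only [pvLoopA, hin, if_neg, Bool.false_eq_true, not_false_iff, hocc, List.foldl_nil]

theorem pv_loopB_eq (g : List Char) (gs : String) (w0 : List Char) (hg : g ≠ []) :
    ∀ (fuel : Nat) (k : Nat) (chars : List Char) (sp : List String), k ≤ w0.length →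
      ((pvOcc g w0).filter (fun j => decide (k ≤ j))).length ≤ fuel →
      pvLoopB g gs w0 fuel (PySem.Chars.findFrom w0 g (k : Int) none) chars sp
        = ((pvOcc g w0).filter (fun j => decide (k ≤ j))).foldl (pvStep gs) (chars, sp) := by
  intro fuel
  induction fuel with
  | zero =>
    intro k chars sp hk hlen
    rw [List.length_eq_zero_iff.mp (Nat.le_zero.mp hlen)]
    rfl
  | succ fuel ih =>
    intro k chars sp hk hlen
    by_cases hf : PySem.Chars.findFrom w0 g (k : Int) none = -1
    · have hninf : ¬ g <:+: w0.drop k :=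
        (PySem.Chars.findFrom_natCast_eq_neg_one_iff w0 g k hk).mp hf
      have hfil : (pvOcc g w0).filter (fun j => decide (k ≤ j)) = [] := by
        rw [List.filter_eq_nil_iff]
        intro j hj hkj
        apply hninf
        have hp : g <+: w0.drop j := (pv_mem_occ hg).mp hj
        have hkj' : k ≤ j := by simpa using hkj
        have : w0.drop j = (w0.drop k).drop (j - k) := by
          rw [List.drop_drop]; congr 1; omega
        rw [this] at hp
        exact hp.isInfix.trans (List.drop_suffix (j - k) (w0.drop k)).isInfix
      rw [hfil]
      simp [pvLoopB, hf]
    · obtain ⟨hkf, hpre, hminf⟩ := PySem.Chars.findFrom_natCast_spec w0 g k hk hf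
      set f := PySem.Chars.findFrom w0 g (k : Int) none with hfdef
      set n : Nat := f.toNat with hn
      have hf0 : (0 : Int) ≤ f := le_trans (by positivity) hkf
      have hfn : f = (n : Int) := (Int.toNat_of_nonneg hf0).symm
      have hkn : k ≤ n := by omega
      have hnlen : n < w0.length := pv_lt_length_of_prefix_drop hg hpre
      have hmem : n ∈ pvOcc g w0 := (pv_mem_occ hg).mpr hpre
      have hmin : ∀ j ∈ pvOcc g w0, k ≤ j → n ≤ j := by
        intro j hj hkj
        by_contra hjn
        exact hminf j (by omega) (by omega) ((pv_mem_occ hg).mp hj)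
      have hfil : (pvOcc g w0).filter (fun j => decide (k ≤ j))
          = n :: (pvOcc g w0).filter (fun j => decide (n + 1 ≤ j)) :=
        pv_sorted_filter_ge (pv_occ_pairwise g w0) hkn hmem hmin
      have hlen' : ((pvOcc g w0).filter (fun j => decide (n + 1 ≤ j))).length ≤ fuel := by
        have hl2 := congrArg List.length hfil
        rw [List.length_cons] at hl2
        omega
      simp only [pvLoopB, if_neg hf]
      rw [show f + 1 = ((n + 1 : Nat) : Int) by rw [hfn]; push_cast; ring]
      rw [ih (n + 1) _ _ (by omega) hlen', hfil]
      rw [hfn]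
      simp only [List.foldl_cons]
      congr 2
      simp [PySem.List.pySetD_natCast]

-- ===== VERDICT (by name: the statement is the Claim_ definition above) =====
theorem get_letter_position_spec : Claim_equal_get_letter_position := by
  unfold Claim_equal_get_letter_position
  intro guess word spaces _ hpre
  obtain ⟨hgne, hrest⟩ := hpre
  have hg : guess.toList ≠ [] := by
    intro h
    exact hgne (by
      have := congrArg String.ofList h
      simpa using this)
  unfold Spec_get_letter_position get_letter_position get_letter_position_alt
  by_cases hin : PySem.Str.isIn guess word = true
  · have hstar : '*' ∉ guess.toList := by
      rcases hrest with h | h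
      · rw [hin] at h; cases h
      · exact h.1
    have hinC : PySem.Chars.isIn guess.toList word.toList = true := by
      rw [← PySem.Str.isIn_eq]; exact hin
    rw [if_pos ⟨hgne, hin⟩]
    have hA := pv_loopA_eq guess.toList guess hg hstar (word.toList.length + 1)
      word.toList spaces (le_trans (List.length_filter_le _ _) (by simp))
    have hfind0 : PySem.Chars.find word.toList guess.toList
        = PySem.Chars.findFrom word.toList guess.toList ((0 : Nat) : Int) none := by
      simp [PySem.Chars.findFrom_zero]
    have hB := pv_loopB_eq guess.toList guess word.toList hg (word.toList.length + 1)
      0 word.toList spaces (by omega)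
      (le_trans (List.length_filter_le _ _) (le_trans (List.length_filter_le _ _) (by simp)))
    have hfil0 : (pvOcc guess.toList word.toList).filter (fun j => decide (0 ≤ j))
        = pvOcc guess.toList word.toList := by
      rw [List.filter_eq_self]; intro x _; simp
    rw [hfil0] at hB
    simp only [hA, hfind0, hB]
  · have hinC : ¬ PySem.Chars.isIn guess.toList word.toList = true := by
      rw [← PySem.Str.isIn_eq]; exact hin
    have hA : pvLoopA guess.toList guess (word.toList.length + 1) word.toList spaces
        = (word.toList, spaces) := by
      simp only [pvLoopA, if_neg hinC]
    rw [if_neg (by intro h; exact hin h.2)]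
    show (String.ofList (pvLoopA guess.toList guess (word.toList.length + 1) word.toList spaces).1,
      (pvLoopA guess.toList guess (word.toList.length + 1) word.toList spaces).2) = (word, spaces)
    rw [hA, String.ofList_toList]
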